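-- pv_equiv track=rewrite | github.com/papertree1/launchpad-sequencer | views.py | seq_four
-- ===== SOURCE A (Python) =====
-- import math
--
-- def seq_four(top_left: int = 1, top_right: int = 2, bottom_left: int = 3, bottom_right: int = 4) -> list:
--     view = []
--     for i in range(64):
--         mod = i % 8
--         div = math.trunc(i / 8)
--         if (mod <= 3 and div <= 3):
--             view.append(top_left)
--         elif (mod > 3 and div <= 3):
--             view.append(top_right)
--         elif (mod <= 3 and div > 3):
--             view.append(bottom_left)
--         elif (mod > 3 and div > 3):
--             view.append(bottom_right)
--     return view
-- ===== SOURCE B (Python) =====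
-- def seq_four(top_left: int = 1, top_right: int = 2, bottom_left: int = 3, bottom_right: int = 4) -> list:
--     top_row = [top_left] * 4 + [top_right] * 4
--     bottom_row = [bottom_left] * 4 + [bottom_right] * 4
--     return top_row * 4 + bottom_row * 4
-- ===== Notes on version B (the rewrite author's own statement) =====
-- stated objective: simpler
-- what changed: Replaces the 64-iteration per-cell mod/div classification loop with block concatenation: build one top row and one bottom row and concatenate four copies of each.
import Mathlib
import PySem

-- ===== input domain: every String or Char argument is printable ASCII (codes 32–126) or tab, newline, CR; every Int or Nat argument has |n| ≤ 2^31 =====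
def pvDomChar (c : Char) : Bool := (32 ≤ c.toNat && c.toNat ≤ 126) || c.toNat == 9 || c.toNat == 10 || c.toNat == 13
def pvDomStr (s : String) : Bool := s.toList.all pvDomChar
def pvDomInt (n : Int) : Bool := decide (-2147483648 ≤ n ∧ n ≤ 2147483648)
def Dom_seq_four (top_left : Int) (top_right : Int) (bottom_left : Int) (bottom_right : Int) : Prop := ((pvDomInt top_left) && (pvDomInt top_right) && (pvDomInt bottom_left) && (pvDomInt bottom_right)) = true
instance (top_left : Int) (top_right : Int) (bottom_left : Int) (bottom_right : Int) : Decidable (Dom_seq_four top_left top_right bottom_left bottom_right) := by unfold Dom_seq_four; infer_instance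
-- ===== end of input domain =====

-- B replaces A's 64-step per-cell mod/div loop with block concatenation of four row copies (simpler decomposition).


-- ===== PORT A =====
-- Port of A: loop i in range(64); math.trunc(i/8) equals floor division for i ≥ 0 (exact here).
def seq_four (top_left : Int) (top_right : Int) (bottom_left : Int) (bottom_right : Int) : List Int :=
  (PySem.List.pyRange 0 64 1).foldl (fun view i =>
    let m := PySem.Int.mod i 8
    let d := PySem.Int.floordiv i 8
    if m ≤ 3 ∧ d ≤ 3 then view ++ [top_left]
    else if m > 3 ∧ d ≤ 3 then view ++ [top_right]
    else if m ≤ 3 ∧ d > 3 then view ++ [bottom_left]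
    else if m > 3 ∧ d > 3 then view ++ [bottom_right]
    else view) []

-- ===== PORT B =====
-- Port of B: two row templates, four copies of each, concatenated (list * 4 = flatten of replicate).
def seq_four_alt (top_left : Int) (top_right : Int) (bottom_left : Int) (bottom_right : Int) : List Int :=
  let top_row := List.replicate 4 top_left ++ List.replicate 4 top_right
  let bottom_row := List.replicate 4 bottom_left ++ List.replicate 4 bottom_right
  (List.replicate 4 top_row).flatten ++ (List.replicate 4 bottom_row).flatten

-- ===== PRECONDITION & SPEC =====
def Spec_seq_four (top_left : Int) (top_right : Int) (bottom_left : Int) (bottom_right : Int) (out : List Int) : Prop := out = seq_four_alt top_left top_right bottom_left bottom_right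
instance (top_left : Int) (top_right : Int) (bottom_left : Int) (bottom_right : Int) (out : List Int) : Decidable (Spec_seq_four top_left top_right bottom_left bottom_right out) := by unfold Spec_seq_four; infer_instance

-- ===== CLAIM (what is proved, stated in full; the proofs are below) =====
def Claim_equal_seq_four : Prop := ∀ (top_left : Int) (top_right : Int) (bottom_left : Int) (bottom_right : Int), Dom_seq_four top_left top_right bottom_left bottom_right → Spec_seq_four top_left top_right bottom_left bottom_right (seq_four top_left top_right bottom_left bottom_right)

-- ===== LEMMAS AND PROOFS =====

-- the loop body of seq_four, as a named function (definitionally equal to the inline lambda)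
def pvStep (tl tr bl br : Int) (view : List Int) (i : Int) : List Int :=
  if PySem.Int.mod i 8 ≤ 3 ∧ PySem.Int.floordiv i 8 ≤ 3 then view ++ [tl]
  else if PySem.Int.mod i 8 > 3 ∧ PySem.Int.floordiv i 8 ≤ 3 then view ++ [tr]
  else if PySem.Int.mod i 8 ≤ 3 ∧ PySem.Int.floordiv i 8 > 3 then view ++ [bl]
  else if PySem.Int.mod i 8 > 3 ∧ PySem.Int.floordiv i 8 > 3 then view ++ [br]
  else view

def pvPick (tl tr bl br : Int) (x : Int) : Int :=
  if x = 0 then tl else if x = 1 then tr else if x = 2 then bl else br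

lemma pvStep_map (tl tr bl br : Int) (a : List Int) (i : Int) :
    pvStep tl tr bl br (a.map (pvPick tl tr bl br)) i
      = (pvStep 0 1 2 3 a i).map (pvPick tl tr bl br) := by
  unfold pvStep
  split_ifs <;> simp [pvPick]

lemma pvFoldl_map (tl tr bl br : Int) :
    ∀ (l : List Int) (a : List Int),
      l.foldl (pvStep tl tr bl br) (a.map (pvPick tl tr bl br))
        = (l.foldl (pvStep 0 1 2 3) a).map (pvPick tl tr bl br) := by
  intro l
  induction l with
  | nil => intro a; rfl
  | cons x xs ih =>
      intro a
      simp only [List.foldl_cons, pvStep_map, ih]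

set_option maxRecDepth 4000 in
lemma pvNum_eval : (PySem.List.pyRange 0 64 1).foldl (pvStep 0 1 2 3) [] =
    [0,0,0,0,1,1,1,1, 0,0,0,0,1,1,1,1, 0,0,0,0,1,1,1,1, 0,0,0,0,1,1,1,1,
     2,2,2,2,3,3,3,3, 2,2,2,2,3,3,3,3, 2,2,2,2,3,3,3,3, 2,2,2,2,3,3,3,3] := by
  decide

lemma seq_four_eq (tl tr bl br : Int) : seq_four tl tr bl br =
    [tl,tl,tl,tl,tr,tr,tr,tr, tl,tl,tl,tl,tr,tr,tr,tr, tl,tl,tl,tl,tr,tr,tr,tr, tl,tl,tl,tl,tr,tr,tr,tr,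
     bl,bl,bl,bl,br,br,br,br, bl,bl,bl,bl,br,br,br,br, bl,bl,bl,bl,br,br,br,br, bl,bl,bl,bl,br,br,br,br] := by
  have h : seq_four tl tr bl br
      = (PySem.List.pyRange 0 64 1).foldl (pvStep tl tr bl br) (([] : List Int).map (pvPick tl tr bl br)) := rfl
  rw [h, pvFoldl_map, pvNum_eval]
  simp [pvPick]

-- ===== VERDICT (by name: the statement is the Claim_ definition above) =====
theorem seq_four_spec : Claim_equal_seq_four := by
  intro tl tr bl br _
  unfold Spec_seq_four
  rw [seq_four_eq]
  simp [seq_four_alt, List.replicate, List.flatten]
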